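-- pv_equiv track=rewrite | github.com/signalnine/tildebin | baremetal_uninterruptible_process_monitor.py | categorize_wait_channel
-- ===== SOURCE A (Python) =====
-- def categorize_wait_channel(wchan):
--     """
--     Categorize wait channel to help identify the type of blocking.
--
--     Returns a tuple of (category, description).
--     """
--     if wchan is None:
--         return ('unknown', 'Unknown wait state')
--
--     wchan_lower = wchan.lower()
--
--     # NFS-related waits
--     if 'nfs' in wchan_lower or 'rpc' in wchan_lower:
--         return ('nfs', 'NFS/RPC operation')
--
--     # Disk I/O waits
--     if any(x in wchan_lower for x in ['blk', 'bio', 'io_schedule', 'wait_on_page']):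
--         return ('disk_io', 'Disk I/O operation')
--
--     # Filesystem waits
--     if any(x in wchan_lower for x in ['ext4', 'xfs', 'btrfs', 'jbd2']):
--         return ('filesystem', 'Filesystem operation')
--
--     # Lock waits
--     if any(x in wchan_lower for x in ['mutex', 'semaphore', 'rwsem', 'lock']):
--         return ('lock', 'Kernel lock contention')
--
--     # Memory waits
--     if any(x in wchan_lower for x in ['page', 'mem', 'swap', 'reclaim']):
--         return ('memory', 'Memory/page operation')
--
--     # Network waits (non-NFS)
--     if any(x in wchan_lower for x in ['sock', 'tcp', 'inet', 'net']):
--         return ('network', 'Network operation')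
--
--     # SCSI/storage driver waits
--     if any(x in wchan_lower for x in ['scsi', 'ata', 'sd_', 'nvme']):
--         return ('storage_driver', 'Storage driver operation')
--
--     return ('other', f'Kernel function: {wchan}')
-- ===== SOURCE B (Python) =====
-- # Single forward scan over start positions with a min-priority accumulator,
-- # instead of an ordered chain of per-group substring-membership tests.
-- _PATTERNS = {
--     'nfs': 0, 'rpc': 0,
--     'blk': 1, 'bio': 1, 'io_schedule': 1, 'wait_on_page': 1,
--     'ext4': 2, 'xfs': 2, 'btrfs': 2, 'jbd2': 2,
--     'mutex': 3, 'semaphore': 3, 'rwsem': 3, 'lock': 3,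
--     'page': 4, 'mem': 4, 'swap': 4, 'reclaim': 4,
--     'sock': 5, 'tcp': 5, 'inet': 5, 'net': 5,
--     'scsi': 6, 'ata': 6, 'sd_': 6, 'nvme': 6,
-- }
-- _CATS = [
--     ('nfs', 'NFS/RPC operation'),
--     ('disk_io', 'Disk I/O operation'),
--     ('filesystem', 'Filesystem operation'),
--     ('lock', 'Kernel lock contention'),
--     ('memory', 'Memory/page operation'),
--     ('network', 'Network operation'),
--     ('storage_driver', 'Storage driver operation'),
-- ]
--
-- def categorize_wait_channel(wchan):
--     if wchan is None:
--         return ('unknown', 'Unknown wait state')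
--     wl = wchan.lower()
--     best = len(_CATS)
--     for i in range(len(wl)):
--         for pat, pri in _PATTERNS.items():
--             if pri < best and wl.startswith(pat, i):
--                 best = pri
--     if best < len(_CATS):
--         return _CATS[best]
--     return ('other', f'Kernel function: {wchan}')
-- ===== Notes on version B (the rewrite author's own statement) =====
-- stated objective: alternative
-- what changed: Instead of an ordered chain of per-group substring-membership tests, B makes one forward scan over every start position of the lowercased string, matching a pattern->priority dict there and keeping the minimum priority, then indexes a category table with that minimum.
import Mathlib
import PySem

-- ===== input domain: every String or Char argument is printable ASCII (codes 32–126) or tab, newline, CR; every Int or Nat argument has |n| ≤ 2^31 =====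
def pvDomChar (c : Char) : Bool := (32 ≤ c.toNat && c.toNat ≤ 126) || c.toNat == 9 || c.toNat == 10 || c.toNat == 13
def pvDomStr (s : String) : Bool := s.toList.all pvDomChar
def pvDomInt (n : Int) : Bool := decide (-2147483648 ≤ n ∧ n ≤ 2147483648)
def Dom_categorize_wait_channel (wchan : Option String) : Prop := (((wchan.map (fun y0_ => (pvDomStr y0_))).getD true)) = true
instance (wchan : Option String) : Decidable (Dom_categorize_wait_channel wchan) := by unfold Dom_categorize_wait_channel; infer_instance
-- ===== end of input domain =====

-- B replaces A's ordered chain of substring-membership tests by one forward scan over start positions keeping the minimum-priority pattern hit (alternative algorithm, same behaviour).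


-- ===== PORT A =====
-- Python `sub in s` is PySem.Str.isIn; `any(x in wl for x in [...])` is List.any.
def categorize_wait_channel (wchan : Option String) : String × String :=
  match wchan with
  | none => ("unknown", "Unknown wait state")
  | some w =>
    let wl := PySem.Str.lower w
    if PySem.Str.isIn "nfs" wl || PySem.Str.isIn "rpc" wl then
      ("nfs", "NFS/RPC operation")
    else if (["blk", "bio", "io_schedule", "wait_on_page"]).any (fun x => PySem.Str.isIn x wl) then
      ("disk_io", "Disk I/O operation")
    else if (["ext4", "xfs", "btrfs", "jbd2"]).any (fun x => PySem.Str.isIn x wl) then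
      ("filesystem", "Filesystem operation")
    else if (["mutex", "semaphore", "rwsem", "lock"]).any (fun x => PySem.Str.isIn x wl) then
      ("lock", "Kernel lock contention")
    else if (["page", "mem", "swap", "reclaim"]).any (fun x => PySem.Str.isIn x wl) then
      ("memory", "Memory/page operation")
    else if (["sock", "tcp", "inet", "net"]).any (fun x => PySem.Str.isIn x wl) then
      ("network", "Network operation")
    else if (["scsi", "ata", "sd_", "nvme"]).any (fun x => PySem.Str.isIn x wl) then
      ("storage_driver", "Storage driver operation")
    else
      ("other", "Kernel function: " ++ w)

-- ===== PORT B =====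
-- the dict _PATTERNS (pattern → priority, insertion order) and the list _CATS of Source B
def wchanPatterns : List (List Char × Nat) :=
  [("nfs".toList, 0), ("rpc".toList, 0),
   ("blk".toList, 1), ("bio".toList, 1), ("io_schedule".toList, 1), ("wait_on_page".toList, 1),
   ("ext4".toList, 2), ("xfs".toList, 2), ("btrfs".toList, 2), ("jbd2".toList, 2),
   ("mutex".toList, 3), ("semaphore".toList, 3), ("rwsem".toList, 3), ("lock".toList, 3),
   ("page".toList, 4), ("mem".toList, 4), ("swap".toList, 4), ("reclaim".toList, 4),
   ("sock".toList, 5), ("tcp".toList, 5), ("inet".toList, 5), ("net".toList, 5),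
   ("scsi".toList, 6), ("ata".toList, 6), ("sd_".toList, 6), ("nvme".toList, 6)]

def wchanCats : List (String × String) :=
  [("nfs", "NFS/RPC operation"),
   ("disk_io", "Disk I/O operation"),
   ("filesystem", "Filesystem operation"),
   ("lock", "Kernel lock contention"),
   ("memory", "Memory/page operation"),
   ("network", "Network operation"),
   ("storage_driver", "Storage driver operation")]

-- Source B, step for step: `wl.startswith(pat, i)` with 0 ≤ i < len(wl) is exactly
-- a prefix test on the i-th suffix, ported as PySem.Chars.startswith (wl.drop i) pat;
-- `range(len(wl))` (length ≥ 0) is List.range.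
def categorize_wait_channel_alt (wchan : Option String) : String × String :=
  match wchan with
  | none => ("unknown", "Unknown wait state")
  | some w =>
    let wl := (PySem.Str.lower w).toList
    let best := (List.range wl.length).foldl (fun best i =>
      wchanPatterns.foldl (fun best pe =>
        if pe.2 < best ∧ PySem.Chars.startswith (wl.drop i) pe.1 = true then pe.2 else best) best) wchanCats.length
    if best < wchanCats.length then wchanCats.getD best ("", "")
    else ("other", "Kernel function: " ++ w)

-- ===== PRECONDITION & SPEC =====
def Spec_categorize_wait_channel (wchan : Option String) (out : String × String) : Prop := out = categorize_wait_channel_alt wchan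
instance (wchan : Option String) (out : String × String) : Decidable (Spec_categorize_wait_channel wchan out) := by unfold Spec_categorize_wait_channel; infer_instance

-- ===== CLAIM (what is proved, stated in full; the proofs are below) =====
def Claim_equal_categorize_wait_channel : Prop := ∀ (wchan : Option String), Dom_categorize_wait_channel wchan → Spec_categorize_wait_channel wchan (categorize_wait_channel wchan)

-- ===== LEMMAS AND PROOFS =====

-- a fold whose step satisfies a ≤-characterization satisfies the folded one
theorem pv_foldl_le_iff {α : Type} (f : Nat → α → Nat) (C : α → Nat → Prop)
    (h : ∀ b i k, f b i ≤ k ↔ b ≤ k ∨ C i k) (l : List α) (b k : Nat) :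
    l.foldl f b ≤ k ↔ b ≤ k ∨ ∃ i ∈ l, C i k := by
  induction l generalizing b with
  | nil => simp
  | cons x xs ih =>
    simp only [List.foldl_cons, ih, h, List.mem_cons]
    constructor
    · rintro ((hb | hc) | ⟨i, hi, hc⟩)
      · exact Or.inl hb
      · exact Or.inr ⟨x, Or.inl rfl, hc⟩
      · exact Or.inr ⟨i, Or.inr hi, hc⟩
    · rintro (hb | ⟨i, (rfl | hi), hc⟩)
      · exact Or.inl (Or.inl hb)
      · exact Or.inl (Or.inr hc)
      · exact Or.inr ⟨i, hi, hc⟩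

-- a fold whose step either keeps b or lands in D attains b or D
theorem pv_foldl_attained {α : Type} (f : Nat → α → Nat) (D : α → Nat → Prop)
    (h : ∀ b i, f b i = b ∨ D i (f b i)) (l : List α) (b : Nat) :
    l.foldl f b = b ∨ ∃ i ∈ l, D i (l.foldl f b) := by
  induction l generalizing b with
  | nil => simp
  | cons x xs ih =>
    simp only [List.foldl_cons, List.mem_cons]
    rcases ih (f b x) with heq | ⟨i, hi, hd⟩
    · rw [heq]
      rcases h b x with hb | hd
      · exact Or.inl hb
      · exact Or.inr ⟨x, Or.inl rfl, hd⟩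
    · exact Or.inr ⟨i, Or.inr hi, hd⟩

-- a nonempty pattern occurring at some start position below the length ↔ `pat in s`
theorem pv_occ_iff (wl pat : List Char) (hpat : pat ≠ []) :
    (∃ i ∈ List.range wl.length, PySem.Chars.startswith (wl.drop i) pat = true) ↔
      PySem.Chars.isIn pat wl = true := by
  rw [← PySem.Chars.exists_prefix_drop_iff_isIn]
  constructor
  · rintro ⟨i, _, hs⟩
    exact ⟨i, (PySem.Chars.startswith_iff _ _).1 hs⟩
  · rintro ⟨j, hj⟩
    have hjlt : j < wl.length := by
      by_contra hge
      rw [List.drop_eq_nil_of_le (Nat.le_of_not_lt hge)] at hj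
      exact hpat (List.prefix_nil.mp hj)
    exact ⟨j, List.mem_range.mpr hjlt, (PySem.Chars.startswith_iff _ _).2 hj⟩

theorem wchanPatterns_ne : ∀ pe ∈ wchanPatterns, pe.1 ≠ [] := by decide

set_option maxHeartbeats 1000000 in
theorem categorize_spec_some (w : String) :
    categorize_wait_channel (some w) = categorize_wait_channel_alt (some w) := by
  unfold categorize_wait_channel categorize_wait_channel_alt
  dsimp only
  set wl := (PySem.Str.lower w).toList with hwl
  set F := (List.range wl.length).foldl (fun best i =>
      wchanPatterns.foldl (fun best pe =>
        if pe.2 < best ∧ PySem.Chars.startswith (wl.drop i) pe.1 = true then pe.2 else best) best) wchanCats.length with hF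
  -- ≤-characterization of the double fold
  have hstep : ∀ (i : Nat) (b : Nat) (pe : List Char × Nat) (k : Nat),
      (if pe.2 < b ∧ PySem.Chars.startswith (wl.drop i) pe.1 = true then pe.2 else b) ≤ k ↔
        b ≤ k ∨ (PySem.Chars.startswith (wl.drop i) pe.1 = true ∧ pe.2 ≤ k) := by
    intro i b pe k
    split_ifs with h
    · obtain ⟨h1, h2⟩ := h
      constructor
      · intro hk; exact Or.inr ⟨h2, hk⟩
      · rintro (hb | ⟨hs, hk⟩)
        · omega
        · exact hk
    · constructor
      · intro hb; exact Or.inl hb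
      · rintro (hb | ⟨hs, hk⟩)
        · exact hb
        · have hnlt : ¬ pe.2 < b := fun hlt => h ⟨hlt, hs⟩
          omega
  have hinner_le : ∀ (i : Nat) (b k : Nat),
      (wchanPatterns.foldl (fun best pe =>
        if pe.2 < best ∧ PySem.Chars.startswith (wl.drop i) pe.1 = true then pe.2 else best) b) ≤ k ↔
      b ≤ k ∨ ∃ pe ∈ wchanPatterns, PySem.Chars.startswith (wl.drop i) pe.1 = true ∧ pe.2 ≤ k := by
    intro i b k
    exact pv_foldl_le_iff _ _ (fun b pe k => hstep i b pe k) _ b k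
  have hle : ∀ k : Nat, F ≤ k ↔ 7 ≤ k ∨ ∃ pe ∈ wchanPatterns, PySem.Chars.isIn pe.1 wl = true ∧ pe.2 ≤ k := by
    intro k
    rw [hF]
    rw [pv_foldl_le_iff _
      (fun i k => ∃ pe ∈ wchanPatterns, PySem.Chars.startswith (wl.drop i) pe.1 = true ∧ pe.2 ≤ k)
      (fun b i k => hinner_le i b k) _ _ k]
    show wchanCats.length ≤ k ∨ _ ↔ _
    constructor
    · rintro (h7 | ⟨i, hi, pe, hmem, hs, hk⟩)
      · exact Or.inl (by simpa [wchanCats] using h7)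
      · refine Or.inr ⟨pe, hmem, ?_, hk⟩
        have hne : pe.1 ≠ [] := wchanPatterns_ne pe hmem
        exact (pv_occ_iff wl pe.1 hne).1 ⟨i, hi, hs⟩
    · rintro (h7 | ⟨pe, hmem, hin, hk⟩)
      · exact Or.inl (by simpa [wchanCats] using h7)
      · have hne : pe.1 ≠ [] := wchanPatterns_ne pe hmem
        obtain ⟨i, hi, hs⟩ := (pv_occ_iff wl pe.1 hne).2 hin
        exact Or.inr ⟨i, hi, pe, hmem, hs, hk⟩
  -- attainment
  have hatt : F = 7 ∨ ∃ pe ∈ wchanPatterns, PySem.Chars.isIn pe.1 wl = true ∧ F = pe.2 := by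
    have h := pv_foldl_attained
      (fun best i => wchanPatterns.foldl (fun best pe =>
        if pe.2 < best ∧ PySem.Chars.startswith (wl.drop i) pe.1 = true then pe.2 else best) best)
      (fun i r => ∃ pe ∈ wchanPatterns, PySem.Chars.startswith (wl.drop i) pe.1 = true ∧ r = pe.2)
      (by
        intro b i
        exact pv_foldl_attained _
          (fun (pe : List Char × Nat) r => PySem.Chars.startswith (wl.drop i) pe.1 = true ∧ r = pe.2)
          (by
            intro b pe
            dsimp only
            split_ifs with h
            · exact Or.inr ⟨h.2, rfl⟩
            · exact Or.inl rfl) _ b)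
      (List.range wl.length) wchanCats.length
    rw [← hF] at h
    rcases h with h | ⟨i, hi, pe, hmem, hs, hr⟩
    · exact Or.inl (by rw [h]; rfl)
    · refine Or.inr ⟨pe, hmem, ?_, hr⟩
      have hne : pe.1 ≠ [] := wchanPatterns_ne pe hmem
      exact (pv_occ_iff wl pe.1 hne).1 ⟨i, hi, hs⟩
  -- group conditions
  have key : ∀ m : Nat, m < 7 →
      (∀ pe ∈ wchanPatterns, pe.2 < m → ¬ PySem.Chars.isIn pe.1 wl = true) →
      (∃ pe ∈ wchanPatterns, pe.2 = m ∧ PySem.Chars.isIn pe.1 wl = true) → F = m := by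
    intro m hm hlow ⟨pe, hmem, hpri, hin⟩
    have h1 : F ≤ m := (hle m).mpr (Or.inr ⟨pe, hmem, hin, by omega⟩)
    rcases hatt with h7 | ⟨pe', hmem', hin', hFe⟩
    · omega
    · have : ¬ pe'.2 < m := fun hlt => hlow pe' hmem' hlt hin'
      omega
  have key7 :
      (∀ pe ∈ wchanPatterns, ¬ PySem.Chars.isIn pe.1 wl = true) → F = 7 := by
    intro hnone
    rcases hatt with h7 | ⟨pe, hmem, hin, _⟩
    · exact h7
    · exact absurd hin (hnone pe hmem)
  clear hatt hle hinner_le hstep hF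
  clear_value F wl
  by_cases h0 : (PySem.Str.isIn "nfs" (PySem.Str.lower w) || PySem.Str.isIn "rpc" (PySem.Str.lower w)) = true
  · rw [if_pos h0]
    simp only [List.any_cons, List.any_nil, Bool.or_eq_true, Bool.or_false, PySem.Str.isIn_eq, not_or, Bool.not_eq_true, ← hwl] at h0
    have hFv : F = 0 := key 0 (by decide)
      (by intro pe hmem; rw [wchanPatterns] at hmem; simp only [List.mem_cons, List.not_mem_nil, or_false] at hmem; rcases hmem with rfl|rfl|rfl|rfl|rfl|rfl|rfl|rfl|rfl|rfl|rfl|rfl|rfl|rfl|rfl|rfl|rfl|rfl|rfl|rfl|rfl|rfl|rfl|rfl|rfl|rfl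
          exacts [fun hlt _ => absurd hlt (by decide), fun hlt _ => absurd hlt (by decide), fun hlt _ => absurd hlt (by decide), fun hlt _ => absurd hlt (by decide), fun hlt _ => absurd hlt (by decide), fun hlt _ => absurd hlt (by decide), fun hlt _ => absurd hlt (by decide), fun hlt _ => absurd hlt (by decide), fun hlt _ => absurd hlt (by decide), fun hlt _ => absurd hlt (by decide), fun hlt _ => absurd hlt (by decide), fun hlt _ => absurd hlt (by decide), fun hlt _ => absurd hlt (by decide), fun hlt _ => absurd hlt (by decide), fun hlt _ => absurd hlt (by decide), fun hlt _ => absurd hlt (by decide), fun hlt _ => absurd hlt (by decide), fun hlt _ => absurd hlt (by decide), fun hlt _ => absurd hlt (by decide), fun hlt _ => absurd hlt (by decide), fun hlt _ => absurd hlt (by decide), fun hlt _ => absurd hlt (by decide), fun hlt _ => absurd hlt (by decide), fun hlt _ => absurd hlt (by decide), fun hlt _ => absurd hlt (by decide), fun hlt _ => absurd hlt (by decide)])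
      (by rcases h0 with h|h
          exacts [⟨("nfs".toList, 0), by decide, rfl, h⟩, ⟨("rpc".toList, 0), by decide, rfl, h⟩])
    rw [hFv]; norm_num [wchanCats]
  · rw [if_neg h0]
    by_cases h1 : ((["blk", "bio", "io_schedule", "wait_on_page"] : List String).any (fun x => PySem.Str.isIn x (PySem.Str.lower w))) = true
    · rw [if_pos h1]
      simp only [List.any_cons, List.any_nil, Bool.or_eq_true, Bool.or_false, PySem.Str.isIn_eq, not_or, Bool.not_eq_true, ← hwl] at h0 h1
      have hFv : F = 1 := key 1 (by decide)
        (by intro pe hmem; rw [wchanPatterns] at hmem; simp only [List.mem_cons, List.not_mem_nil, or_false] at hmem; rcases hmem with rfl|rfl|rfl|rfl|rfl|rfl|rfl|rfl|rfl|rfl|rfl|rfl|rfl|rfl|rfl|rfl|rfl|rfl|rfl|rfl|rfl|rfl|rfl|rfl|rfl|rfl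
            exacts [fun _ hin => absurd hin (ne_true_of_eq_false h0.1), fun _ hin => absurd hin (ne_true_of_eq_false h0.2), fun hlt _ => absurd hlt (by decide), fun hlt _ => absurd hlt (by decide), fun hlt _ => absurd hlt (by decide), fun hlt _ => absurd hlt (by decide), fun hlt _ => absurd hlt (by decide), fun hlt _ => absurd hlt (by decide), fun hlt _ => absurd hlt (by decide), fun hlt _ => absurd hlt (by decide), fun hlt _ => absurd hlt (by decide), fun hlt _ => absurd hlt (by decide), fun hlt _ => absurd hlt (by decide), fun hlt _ => absurd hlt (by decide), fun hlt _ => absurd hlt (by decide), fun hlt _ => absurd hlt (by decide), fun hlt _ => absurd hlt (by decide), fun hlt _ => absurd hlt (by decide), fun hlt _ => absurd hlt (by decide), fun hlt _ => absurd hlt (by decide), fun hlt _ => absurd hlt (by decide), fun hlt _ => absurd hlt (by decide), fun hlt _ => absurd hlt (by decide), fun hlt _ => absurd hlt (by decide), fun hlt _ => absurd hlt (by decide), fun hlt _ => absurd hlt (by decide)])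
        (by rcases h1 with h|h|h|h
            exacts [⟨("blk".toList, 1), by decide, rfl, h⟩, ⟨("bio".toList, 1), by decide, rfl, h⟩, ⟨("io_schedule".toList, 1), by decide, rfl, h⟩, ⟨("wait_on_page".toList, 1), by decide, rfl, h⟩])
      rw [hFv]; norm_num [wchanCats]
    · rw [if_neg h1]
      by_cases h2 : ((["ext4", "xfs", "btrfs", "jbd2"] : List String).any (fun x => PySem.Str.isIn x (PySem.Str.lower w))) = true
      · rw [if_pos h2]
        simp only [List.any_cons, List.any_nil, Bool.or_eq_true, Bool.or_false, PySem.Str.isIn_eq, not_or, Bool.not_eq_true, ← hwl] at h0 h1 h2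
        have hFv : F = 2 := key 2 (by decide)
          (by intro pe hmem; rw [wchanPatterns] at hmem; simp only [List.mem_cons, List.not_mem_nil, or_false] at hmem; rcases hmem with rfl|rfl|rfl|rfl|rfl|rfl|rfl|rfl|rfl|rfl|rfl|rfl|rfl|rfl|rfl|rfl|rfl|rfl|rfl|rfl|rfl|rfl|rfl|rfl|rfl|rfl
              exacts [fun _ hin => absurd hin (ne_true_of_eq_false h0.1), fun _ hin => absurd hin (ne_true_of_eq_false h0.2), fun _ hin => absurd hin (ne_true_of_eq_false h1.1), fun _ hin => absurd hin (ne_true_of_eq_false h1.2.1), fun _ hin => absurd hin (ne_true_of_eq_false h1.2.2.1), fun _ hin => absurd hin (ne_true_of_eq_false h1.2.2.2), fun hlt _ => absurd hlt (by decide), fun hlt _ => absurd hlt (by decide), fun hlt _ => absurd hlt (by decide), fun hlt _ => absurd hlt (by decide), fun hlt _ => absurd hlt (by decide), fun hlt _ => absurd hlt (by decide), fun hlt _ => absurd hlt (by decide), fun hlt _ => absurd hlt (by decide), fun hlt _ => absurd hlt (by decide), fun hlt _ => absurd hlt (by decide), fun hlt _ => absurd hlt (by decide), fun hlt _ => absurd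 hlt (by decide), fun hlt _ => absurd hlt (by decide), fun hlt _ => absurd hlt (by decide), fun hlt _ => absurd hlt (by decide), fun hlt _ => absurd hlt (by decide), fun hlt _ => absurd hlt (by decide), fun hlt _ => absurd hlt (by decide), fun hlt _ => absurd hlt (by decide), fun hlt _ => absurd hlt (by decide)])
          (by rcases h2 with h|h|h|h
              exacts [⟨("ext4".toList, 2), by decide, rfl, h⟩, ⟨("xfs".toList, 2), by decide, rfl, h⟩, ⟨("btrfs".toList, 2), by decide, rfl, h⟩, ⟨("jbd2".toList, 2), by decide, rfl, h⟩])
        rw [hFv]; norm_num [wchanCats]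
      · rw [if_neg h2]
        by_cases h3 : ((["mutex", "semaphore", "rwsem", "lock"] : List String).any (fun x => PySem.Str.isIn x (PySem.Str.lower w))) = true
        · rw [if_pos h3]
          simp only [List.any_cons, List.any_nil, Bool.or_eq_true, Bool.or_false, PySem.Str.isIn_eq, not_or, Bool.not_eq_true, ← hwl] at h0 h1 h2 h3
          have hFv : F = 3 := key 3 (by decide)
            (by intro pe hmem; rw [wchanPatterns] at hmem; simp only [List.mem_cons, List.not_mem_nil, or_false] at hmem; rcases hmem with rfl|rfl|rfl|rfl|rfl|rfl|rfl|rfl|rfl|rfl|rfl|rfl|rfl|rfl|rfl|rfl|rfl|rfl|rfl|rfl|rfl|rfl|rfl|rfl|rfl|rfl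
                exacts [fun _ hin => absurd hin (ne_true_of_eq_false h0.1), fun _ hin => absurd hin (ne_true_of_eq_false h0.2), fun _ hin => absurd hin (ne_true_of_eq_false h1.1), fun _ hin => absurd hin (ne_true_of_eq_false h1.2.1), fun _ hin => absurd hin (ne_true_of_eq_false h1.2.2.1), fun _ hin => absurd hin (ne_true_of_eq_false h1.2.2.2), fun _ hin => absurd hin (ne_true_of_eq_false h2.1), fun _ hin => absurd hin (ne_true_of_eq_false h2.2.1), fun _ hin => absurd hin (ne_true_of_eq_false h2.2.2.1), fun _ hin => absurd hin (ne_true_of_eq_false h2.2.2.2), fun hlt _ => absurd hlt (by decide), fun hlt _ => absurd hlt (by decide), fun hlt _ => absurd hlt (by decide), fun hlt _ => absurd hlt (by decide), fun hlt _ => absurd hlt (by decide), fun hlt _ => absurd hlt (by decide), fun hlt _ => absurd hlt (by decide), fun hlt _ => absurd hlt (by decide), fun hlt _ => absurd hlt (by decide), fun hlt _ => absurd hlt (by decide), fun hlt _ => absurd hlt (by decide), fun hlt _ => absurd hlt (by decide), fun hlt _ => absurd hlt (by decide), fun hlt _ => absurd hlt (by decide), fun hlt _ => absurd hlt (by decide),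 fun hlt _ => absurd hlt (by decide)])
            (by rcases h3 with h|h|h|h
                exacts [⟨("mutex".toList, 3), by decide, rfl, h⟩, ⟨("semaphore".toList, 3), by decide, rfl, h⟩, ⟨("rwsem".toList, 3), by decide, rfl, h⟩, ⟨("lock".toList, 3), by decide, rfl, h⟩])
          rw [hFv]; norm_num [wchanCats]
        · rw [if_neg h3]
          by_cases h4 : ((["page", "mem", "swap", "reclaim"] : List String).any (fun x => PySem.Str.isIn x (PySem.Str.lower w))) = true
          · rw [if_pos h4]
            simp only [List.any_cons, List.any_nil, Bool.or_eq_true, Bool.or_false, PySem.Str.isIn_eq, not_or, Bool.not_eq_true, ← hwl] at h0 h1 h2 h3 h4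
            have hFv : F = 4 := key 4 (by decide)
              (by intro pe hmem; rw [wchanPatterns] at hmem; simp only [List.mem_cons, List.not_mem_nil, or_false] at hmem; rcases hmem with rfl|rfl|rfl|rfl|rfl|rfl|rfl|rfl|rfl|rfl|rfl|rfl|rfl|rfl|rfl|rfl|rfl|rfl|rfl|rfl|rfl|rfl|rfl|rfl|rfl|rfl
                  exacts [fun _ hin => absurd hin (ne_true_of_eq_false h0.1), fun _ hin => absurd hin (ne_true_of_eq_false h0.2), fun _ hin => absurd hin (ne_true_of_eq_false h1.1), fun _ hin => absurd hin (ne_true_of_eq_false h1.2.1), fun _ hin => absurd hin (ne_true_of_eq_false h1.2.2.1), fun _ hin => absurd hin (ne_true_of_eq_false h1.2.2.2), fun _ hin => absurd hin (ne_true_of_eq_false h2.1), fun _ hin => absurd hin (ne_true_of_eq_false h2.2.1), fun _ hin => absurd hin (ne_true_of_eq_false h2.2.2.1), fun _ hin => absurd hin (ne_true_of_eq_false h2.2.2.2), fun _ hin => absurd hin (ne_true_of_eq_false h3.1), fun _ hin => absurd hin (ne_true_of_eq_false h3.2.1), fun _ hin => absurd hin (ne_true_of_eq_false h3.2.2.1),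 fun _ hin => absurd hin (ne_true_of_eq_false h3.2.2.2), fun hlt _ => absurd hlt (by decide), fun hlt _ => absurd hlt (by decide), fun hlt _ => absurd hlt (by decide), fun hlt _ => absurd hlt (by decide), fun hlt _ => absurd hlt (by decide), fun hlt _ => absurd hlt (by decide), fun hlt _ => absurd hlt (by decide), fun hlt _ => absurd hlt (by decide), fun hlt _ => absurd hlt (by decide), fun hlt _ => absurd hlt (by decide), fun hlt _ => absurd hlt (by decide), fun hlt _ => absurd hlt (by decide)])
              (by rcases h4 with h|h|h|h
                  exacts [⟨("page".toList, 4), by decide, rfl, h⟩, ⟨("mem".toList, 4), by decide, rfl, h⟩, ⟨("swap".toList, 4), by decide, rfl, h⟩, ⟨("reclaim".toList, 4), by decide, rfl, h⟩])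
            rw [hFv]; norm_num [wchanCats]
          · rw [if_neg h4]
            by_cases h5 : ((["sock", "tcp", "inet", "net"] : List String).any (fun x => PySem.Str.isIn x (PySem.Str.lower w))) = true
            · rw [if_pos h5]
              simp only [List.any_cons, List.any_nil, Bool.or_eq_true, Bool.or_false, PySem.Str.isIn_eq, not_or, Bool.not_eq_true, ← hwl] at h0 h1 h2 h3 h4 h5
              have hFv : F = 5 := key 5 (by decide)
                (by intro pe hmem; rw [wchanPatterns] at hmem; simp only [List.mem_cons, List.not_mem_nil, or_false] at hmem; rcases hmem with rfl|rfl|rfl|rfl|rfl|rfl|rfl|rfl|rfl|rfl|rfl|rfl|rfl|rfl|rfl|rfl|rfl|rfl|rfl|rfl|rfl|rfl|rfl|rfl|rfl|rfl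
                    exacts [fun _ hin => absurd hin (ne_true_of_eq_false h0.1), fun _ hin => absurd hin (ne_true_of_eq_false h0.2), fun _ hin => absurd hin (ne_true_of_eq_false h1.1), fun _ hin => absurd hin (ne_true_of_eq_false h1.2.1), fun _ hin => absurd hin (ne_true_of_eq_false h1.2.2.1), fun _ hin => absurd hin (ne_true_of_eq_false h1.2.2.2), fun _ hin => absurd hin (ne_true_of_eq_false h2.1), fun _ hin => absurd hin (ne_true_of_eq_false h2.2.1), fun _ hin => absurd hin (ne_true_of_eq_false h2.2.2.1), fun _ hin => absurd hin (ne_true_of_eq_false h2.2.2.2), fun _ hin => absurd hin (ne_true_of_eq_false h3.1), fun _ hin => absurd hin (ne_true_of_eq_false h3.2.1), fun _ hin => absurd hin (ne_true_of_eq_false h3.2.2.1), fun _ hin => absurd hin (ne_true_of_eq_false h3.2.2.2), fun _ hin => absurd hin (ne_true_of_eq_false h4.1), fun _ hin => absurd hin (ne_true_of_eq_false h4.2.1), fun _ hin => absurd hin (ne_true_of_eq_false h4.2.2.1), fun _ hin => absurd hin (ne_true_of_eq_false h4.2.2.2), fun hlt _ => absurd hlt (by decide), fun hlt _ => absurd hlt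 (by decide), fun hlt _ => absurd hlt (by decide), fun hlt _ => absurd hlt (by decide), fun hlt _ => absurd hlt (by decide), fun hlt _ => absurd hlt (by decide), fun hlt _ => absurd hlt (by decide), fun hlt _ => absurd hlt (by decide)])
                (by rcases h5 with h|h|h|h
                    exacts [⟨("sock".toList, 5), by decide, rfl, h⟩, ⟨("tcp".toList, 5), by decide, rfl, h⟩, ⟨("inet".toList, 5), by decide, rfl, h⟩, ⟨("net".toList, 5), by decide, rfl, h⟩])
              rw [hFv]; norm_num [wchanCats]
            · rw [if_neg h5]
              by_cases h6 : ((["scsi", "ata", "sd_", "nvme"] : List String).any (fun x => PySem.Str.isIn x (PySem.Str.lower w))) = true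
              · rw [if_pos h6]
                simp only [List.any_cons, List.any_nil, Bool.or_eq_true, Bool.or_false, PySem.Str.isIn_eq, not_or, Bool.not_eq_true, ← hwl] at h0 h1 h2 h3 h4 h5 h6
                have hFv : F = 6 := key 6 (by decide)
                  (by intro pe hmem; rw [wchanPatterns] at hmem; simp only [List.mem_cons, List.not_mem_nil, or_false] at hmem; rcases hmem with rfl|rfl|rfl|rfl|rfl|rfl|rfl|rfl|rfl|rfl|rfl|rfl|rfl|rfl|rfl|rfl|rfl|rfl|rfl|rfl|rfl|rfl|rfl|rfl|rfl|rfl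
                      exacts [fun _ hin => absurd hin (ne_true_of_eq_false h0.1), fun _ hin => absurd hin (ne_true_of_eq_false h0.2), fun _ hin => absurd hin (ne_true_of_eq_false h1.1), fun _ hin => absurd hin (ne_true_of_eq_false h1.2.1), fun _ hin => absurd hin (ne_true_of_eq_false h1.2.2.1), fun _ hin => absurd hin (ne_true_of_eq_false h1.2.2.2), fun _ hin => absurd hin (ne_true_of_eq_false h2.1), fun _ hin => absurd hin (ne_true_of_eq_false h2.2.1), fun _ hin => absurd hin (ne_true_of_eq_false h2.2.2.1), fun _ hin => absurd hin (ne_true_of_eq_false h2.2.2.2), fun _ hin => absurd hin (ne_true_of_eq_false h3.1), fun _ hin => absurd hin (ne_true_of_eq_false h3.2.1), fun _ hin => absurd hin (ne_true_of_eq_false h3.2.2.1), fun _ hin => absurd hin (ne_true_of_eq_false h3.2.2.2), fun _ hin => absurd hin (ne_true_of_eq_false h4.1), fun _ hin => absurd hin (ne_true_of_eq_false h4.2.1), fun _ hin => absurd hin (ne_true_of_eq_false h4.2.2.1), fun _ hin => absurd hin (ne_true_of_eq_false h4.2.2.2), fun _ hin => absurd hin (ne_true_of_eq_false h5.1), fun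 _ hin => absurd hin (ne_true_of_eq_false h5.2.1), fun _ hin => absurd hin (ne_true_of_eq_false h5.2.2.1), fun _ hin => absurd hin (ne_true_of_eq_false h5.2.2.2), fun hlt _ => absurd hlt (by decide), fun hlt _ => absurd hlt (by decide), fun hlt _ => absurd hlt (by decide), fun hlt _ => absurd hlt (by decide)])
                  (by rcases h6 with h|h|h|h
                      exacts [⟨("scsi".toList, 6), by decide, rfl, h⟩, ⟨("ata".toList, 6), by decide, rfl, h⟩, ⟨("sd_".toList, 6), by decide, rfl, h⟩, ⟨("nvme".toList, 6), by decide, rfl, h⟩])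
                rw [hFv]; norm_num [wchanCats]
              · rw [if_neg h6]
                simp only [List.any_cons, List.any_nil, Bool.or_eq_true, Bool.or_false, PySem.Str.isIn_eq, not_or, Bool.not_eq_true, ← hwl] at h0 h1 h2 h3 h4 h5 h6
                have hFv : F = 7 := key7
                  (by intro pe hmem; rw [wchanPatterns] at hmem; simp only [List.mem_cons, List.not_mem_nil, or_false] at hmem; rcases hmem with rfl|rfl|rfl|rfl|rfl|rfl|rfl|rfl|rfl|rfl|rfl|rfl|rfl|rfl|rfl|rfl|rfl|rfl|rfl|rfl|rfl|rfl|rfl|rfl|rfl|rfl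
                      exacts [fun hin => absurd hin (ne_true_of_eq_false h0.1), fun hin => absurd hin (ne_true_of_eq_false h0.2), fun hin => absurd hin (ne_true_of_eq_false h1.1), fun hin => absurd hin (ne_true_of_eq_false h1.2.1), fun hin => absurd hin (ne_true_of_eq_false h1.2.2.1), fun hin => absurd hin (ne_true_of_eq_false h1.2.2.2), fun hin => absurd hin (ne_true_of_eq_false h2.1), fun hin => absurd hin (ne_true_of_eq_false h2.2.1), fun hin => absurd hin (ne_true_of_eq_false h2.2.2.1), fun hin => absurd hin (ne_true_of_eq_false h2.2.2.2), fun hin => absurd hin (ne_true_of_eq_false h3.1), fun hin => absurd hin (ne_true_of_eq_false h3.2.1), fun hin => absurd hin (ne_true_of_eq_false h3.2.2.1), fun hin => absurd hin (ne_true_of_eq_false h3.2.2.2), fun hin => absurd hin (ne_true_of_eq_false h4.1), fun hin => absurd hin (ne_true_of_eq_false h4.2.1), fun hin => absurd hin (ne_true_of_eq_false h4.2.2.1), fun hin => absurd hin (ne_true_of_eq_false h4.2.2.2), fun hin => absurd hin (ne_true_of_eq_false h5.1), fun hin => absurd hin (ne_true_of_eq_false h5.2.1), fun hin => absurd hin (ne_true_of_eq_false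 h5.2.2.1), fun hin => absurd hin (ne_true_of_eq_false h5.2.2.2), fun hin => absurd hin (ne_true_of_eq_false h6.1), fun hin => absurd hin (ne_true_of_eq_false h6.2.1), fun hin => absurd hin (ne_true_of_eq_false h6.2.2.1), fun hin => absurd hin (ne_true_of_eq_false h6.2.2.2)])
                rw [hFv]; norm_num [wchanCats]

-- ===== VERDICT (by name: the statement is the Claim_ definition above) =====
theorem categorize_wait_channel_spec : Claim_equal_categorize_wait_channel := by
  intro wchan _
  unfold Spec_categorize_wait_channel
  cases wchan with
  | none => rfl
  | some w => exact categorize_spec_some w
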